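-- pv_equiv track=rewrite | github.com/shrutiashok7/ap-final-assignment | q2.py | minIndexFirstString
-- ===== SOURCE A (Python) =====
-- def minIndexFirstString(str1, str2):
--     max_index = -1
--
--     for i in range(len(str1)):
--         for j in range(len(str2)):
--             if str1[i] == str2[j]:
--                 max_index = max(max_index, i)
--                 break
--
--     return max_index
-- ===== SOURCE B (Python) =====
-- def minIndexFirstString(str1, str2):
--     chars = set(str2)
--     for i in range(len(str1) - 1, -1, -1):
--         if str1[i] in chars:
--             return i
--     return -1
-- ===== Notes on version B (the rewrite author's own statement) =====
-- stated objective: alternative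
-- what changed: Replaced the forward double scan with a running max accumulator by a set of str2's characters plus a backward scan that returns the first (i.e. highest) matching index immediately.
import Mathlib
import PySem

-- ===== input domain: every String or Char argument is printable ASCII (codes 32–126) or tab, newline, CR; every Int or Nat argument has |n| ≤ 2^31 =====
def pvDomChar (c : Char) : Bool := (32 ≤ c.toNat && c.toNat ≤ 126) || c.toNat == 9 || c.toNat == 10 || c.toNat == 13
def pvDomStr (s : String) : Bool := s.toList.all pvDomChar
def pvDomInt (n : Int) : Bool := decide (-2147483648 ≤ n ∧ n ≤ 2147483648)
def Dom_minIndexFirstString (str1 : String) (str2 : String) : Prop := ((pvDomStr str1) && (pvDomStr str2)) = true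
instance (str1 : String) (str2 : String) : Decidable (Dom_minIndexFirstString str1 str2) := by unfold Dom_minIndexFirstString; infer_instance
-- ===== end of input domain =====

-- B replaces the quadratic forward scan with a max accumulator by a character set
-- for str2 and a backward scan returning the first (highest) matching index (alternative decomposition).

-- ===== PORT A =====
-- inner loop "for j in range(len(str2)): if str1[i] == str2[j]: …; break"
def pvAInner (c : Char) : List Char → Bool
  | [] => false
  | d :: ds => if c == d then true else pvAInner c ds

def minIndexFirstString (str1 : String) (str2 : String) : Int :=
  (PySem.List.enumerate str1.toList).foldl
    (fun acc p => if pvAInner p.2 str2.toList then max acc p.1 else acc) (-1)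

-- ===== PORT B =====
-- "for i in range(len(str1)-1, -1, -1): if str1[i] in chars: return i"; the early return
-- is the base of the recursion.  pyGetD is exact here: every scanned index is in range.
def pvBScan (cs : List Char) (chars : PySem.Set Char) : List Int → Int
  | [] => -1
  | i :: rest =>
    if PySem.Set.contains chars (PySem.List.pyGetD cs i ' ') then i
    else pvBScan cs chars rest

def minIndexFirstString_alt (str1 : String) (str2 : String) : Int :=
  let chars := PySem.Set.ofList str2.toList
  pvBScan str1.toList chars
    (PySem.List.pyRange ((str1.toList.length : Int) - 1) (-1) (-1))

-- ===== PRECONDITION & SPEC =====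
def Spec_minIndexFirstString (str1 : String) (str2 : String) (out : Int) : Prop := out = minIndexFirstString_alt str1 str2
instance (str1 : String) (str2 : String) (out : Int) : Decidable (Spec_minIndexFirstString str1 str2 out) := by unfold Spec_minIndexFirstString; infer_instance

-- ===== CLAIM (what is proved, stated in full; the proofs are below) =====
def Claim_equal_minIndexFirstString : Prop := ∀ (str1 : String) (str2 : String), Dom_minIndexFirstString str1 str2 → Spec_minIndexFirstString str1 str2 (minIndexFirstString str1 str2)

-- ===== LEMMAS AND PROOFS =====\n

-- A's inner loop is membership in str2's character list
theorem pvAInner_eq (c : Char) (l : List Char) : pvAInner c l = decide (c ∈ l) := by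
  induction l with
  | nil => simp [pvAInner]
  | cons d ds ih => by_cases h : c = d <;> simp [pvAInner, h, ih]

-- abbreviation for A's fold (proof-side only)
def pvFoldA (p2 : List Char) (cs : List (Int × Char)) (acc : Int) : Int :=
  cs.foldl (fun acc p => if pvAInner p.2 p2 then max acc p.1 else acc) acc

-- A's accumulator stays below the next index: its result over enumerate cs s is < s + len cs
theorem pvFoldA_lt (p2 : List Char) (cs : List Char) :
    ∀ (s acc : Int), acc < s → pvFoldA p2 (PySem.List.enumerate cs s) acc < s + cs.length := by
  induction cs with
  | nil => intro s acc h; simpa [pvFoldA] using h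
  | cons c cs ih =>
    intro s acc h
    have h1 : (if pvAInner c p2 then max acc s else acc) < s + 1 := by
      split <;> omega
    have h2 := ih (s + 1) _ h1
    have h3 : s + ((c :: cs).length : Int) = (s + 1) + cs.length := by
      push_cast [List.length_cons]
      ring
    rw [PySem.List.enumerate_cons, h3]
    simpa [pvFoldA] using h2

-- pvBScan ignores an appended character as long as every index it visits is below len cs
theorem pvBScan_append (cs : List Char) (c : Char) (chars : PySem.Set Char) :
    ∀ (l : List Int), (∀ i ∈ l, 0 ≤ i ∧ i < (cs.length : Int)) →
      pvBScan (cs ++ [c]) chars l = pvBScan cs chars l := by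
  intro l hl
  induction l with
  | nil => rfl
  | cons i rest ih =>
    have hi := hl i (by simp)
    have hget : PySem.List.pyGetD (cs ++ [c]) i ' ' = PySem.List.pyGetD cs i ' ' := by
      rw [PySem.List.pyGetD_of_nonneg _ _ hi.1, PySem.List.pyGetD_of_nonneg _ _ hi.1]
      have hlt : i.toNat < cs.length := by omega
      simp [List.getD, List.getElem?_append_left hlt]
    simp only [pvBScan, hget]
    split
    · rfl
    · exact ih (fun j hj => hl j (by simp [hj]))

-- main equivalence, by induction on str1's characters from the back
theorem pvKey (p2 : List Char) (cs : List Char) :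
    pvFoldA p2 (PySem.List.enumerate cs 0) (-1)
      = pvBScan cs (PySem.Set.ofList p2)
          (PySem.List.pyRange ((cs.length : Int) - 1) (-1) (-1)) := by
  induction cs using List.reverseRecOn with
  | nil =>
    rw [PySem.List.pyRange_neg_one_eq_nil (by norm_num)]
    rfl
  | append_singleton cs c ih =>
    have hn : (-1 : Int) < (cs.length : Int) := by omega
    -- left side: fold over enumerate (cs ++ [c]) 0
    have hL : pvFoldA p2 (PySem.List.enumerate (cs ++ [c]) 0) (-1)
        = (if pvAInner c p2
            then max (pvFoldA p2 (PySem.List.enumerate cs 0) (-1)) (cs.length : Int)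
            else pvFoldA p2 (PySem.List.enumerate cs 0) (-1)) := by
      simp [PySem.List.enumerate_append, pvFoldA, List.foldl_append]
    -- right side: descending range for length len cs + 1 starts at len cs
    have hR : PySem.List.pyRange (((cs ++ [c]).length : Int) - 1) (-1) (-1)
        = (cs.length : Int) :: PySem.List.pyRange ((cs.length : Int) - 1) (-1) (-1) := by
      have : ((cs ++ [c]).length : Int) - 1 = (cs.length : Int) := by
        simp
      rw [this, PySem.List.pyRange_neg_one_cons hn]
    have hget : PySem.List.pyGetD (cs ++ [c]) (cs.length : Int) ' ' = c := by
      rw [PySem.List.pyGetD_of_nonneg _ _ (by omega)]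
      simp [List.getD]
    have hbound := pvFoldA_lt p2 cs 0 (-1) (by norm_num)
    rw [hL, hR]
    simp only [pvBScan, hget]
    rw [pvBScan_append cs c _ _ (by
      intro i hi
      rw [PySem.List.mem_pyRange_neg_one] at hi
      omega)]
    rw [pvAInner_eq]
    by_cases hc : c ∈ p2
    · have : PySem.Set.contains (PySem.Set.ofList p2) c = true := by
        rw [PySem.Set.contains_iff, PySem.Set.mem_ofList]; exact hc
      simp only [hc, decide_true, if_true, this]
      simp at hbound
      omega
    · have : PySem.Set.contains (PySem.Set.ofList p2) c = false := by
        rw [Bool.eq_false_iff]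
        intro h
        exact hc ((PySem.Set.mem_ofList _ _).mp ((PySem.Set.contains_iff _ _).mp h))
      simp [hc, ih]

-- ===== VERDICT (by name: the statement is the Claim_ definition above) =====
theorem minIndexFirstString_spec : Claim_equal_minIndexFirstString := by
  intro str1 str2 _
  unfold Spec_minIndexFirstString minIndexFirstString minIndexFirstString_alt
  exact pvKey str2.toList str1.toList
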